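-- pv_equiv track=rewrite | github.com/McMomo/MI_CG | glfwAnimals/ObjParser.py | sortFile
-- ===== SOURCE A (Python) =====
-- def sortFile(file):
--     v = []
--     vt = []
--     vn = []
--     f = []
--     for line in file:
--         if(line.startswith("v ")):
--             v.append(line)
--         elif(line.startswith("vt ")):
--             vt.append(line)
--         elif(line.startswith("vn ")):
--             vn.append(line)
--         elif(line.startswith("f ")):
--             f.append(line)
--
--     sortedFile = []
--     sortedFile.extend(v)
--     sortedFile.extend(vt)
--     sortedFile.extend(vn)
--     sortedFile.extend(f)
--
--     return sortedFile
-- ===== SOURCE B (Python) =====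
-- def _rank(line):
--     if line.startswith("v "):
--         return 0
--     if line.startswith("vt "):
--         return 1
--     if line.startswith("vn "):
--         return 2
--     if line.startswith("f "):
--         return 3
--     return None
--
--
-- def sortFile(file):
--     pairs = []
--     for line in file:
--         r = _rank(line)
--         if r is not None:
--             pairs.append((r, line))
--     pairs.sort(key=lambda t: t[0])
--     return [line for _, line in pairs]
-- ===== Notes on version B (the rewrite author's own statement) =====
-- stated objective: alternative
-- what changed: Replaces A's four explicit buckets concatenated at the end with a decorate-stable-sort strategy: tag each kept line with a category rank in one pass, stable-sort by rank, and strip the tags.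
import Mathlib
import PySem

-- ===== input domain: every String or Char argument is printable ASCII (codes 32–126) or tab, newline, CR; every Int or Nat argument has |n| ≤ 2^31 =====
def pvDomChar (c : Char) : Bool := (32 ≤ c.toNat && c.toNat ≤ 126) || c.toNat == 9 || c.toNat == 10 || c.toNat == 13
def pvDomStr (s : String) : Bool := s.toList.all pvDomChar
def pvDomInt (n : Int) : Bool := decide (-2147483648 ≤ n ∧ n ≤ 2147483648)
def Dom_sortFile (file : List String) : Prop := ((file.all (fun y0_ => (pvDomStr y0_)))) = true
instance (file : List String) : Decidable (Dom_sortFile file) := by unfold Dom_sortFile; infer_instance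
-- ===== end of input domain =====

-- B replaces A's four explicit buckets with a decorate/stable-sort/strip strategy (alternative algorithm, same behaviour).


-- ===== PORT A =====
def sortFile (file : List String) : List String :=
  let st := file.foldl
    (fun (acc : List String × List String × List String × List String) line =>
      let (v, vt, vn, f) := acc
      if PySem.Str.startswith line "v " then (v ++ [line], vt, vn, f)
      else if PySem.Str.startswith line "vt " then (v, vt ++ [line], vn, f)
      else if PySem.Str.startswith line "vn " then (v, vt, vn ++ [line], f)
      else if PySem.Str.startswith line "f " then (v, vt, vn, f ++ [line])
      else (v, vt, vn, f))
    ([], [], [], [])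
  st.1 ++ st.2.1 ++ st.2.2.1 ++ st.2.2.2

-- ===== PORT B =====
def pvRank (line : String) : Option Int :=
  if PySem.Str.startswith line "v " then some 0
  else if PySem.Str.startswith line "vt " then some 1
  else if PySem.Str.startswith line "vn " then some 2
  else if PySem.Str.startswith line "f " then some 3
  else none

def sortFile_alt (file : List String) : List String :=
  let pairs := file.foldl
    (fun (acc : List (Int × String)) line =>
      match pvRank line with
      | some r => acc ++ [(r, line)]
      | none => acc) []
  (PySem.List.sorted pairs (fun t => t.1)).map (fun t => t.2)

-- ===== PRECONDITION & SPEC =====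
def Spec_sortFile (file : List String) (out : List String) : Prop := out = sortFile_alt file
instance (file : List String) (out : List String) : Decidable (Spec_sortFile file out) := by unfold Spec_sortFile; infer_instance

-- ===== CLAIM (what is proved, stated in full; the proofs are below) =====
def Claim_equal_sortFile : Prop := ∀ (file : List String), Dom_sortFile file → Spec_sortFile file (sortFile file)

-- ===== LEMMAS AND PROOFS =====

/-- lines of the given rank, in order -/
def pvG (i : Int) (xs : List String) : List String :=
  xs.filter (fun l => pvRank l == some i)

def pvPairs (xs : List String) : List (Int × String) :=
  xs.filterMap (fun l => (pvRank l).map (fun r => (r, l)))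

def pvF (i : Int) (P : List (Int × String)) : List (Int × String) :=
  P.filter (fun t => t.1 == i)

lemma pvRank_cases (l : String) (r : Int) (h : pvRank l = some r) :
    r = 0 ∨ r = 1 ∨ r = 2 ∨ r = 3 := by
  unfold pvRank at h; split_ifs at h <;> simp_all

lemma foldlA (xs : List String) (v vt vn f : List String) :
    xs.foldl
      (fun (acc : List String × List String × List String × List String) line =>
        let (v, vt, vn, f) := acc
        if PySem.Str.startswith line "v " then (v ++ [line], vt, vn, f)
        else if PySem.Str.startswith line "vt " then (v, vt ++ [line], vn, f)
        else if PySem.Str.startswith line "vn " then (v, vt, vn ++ [line], f)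
        else if PySem.Str.startswith line "f " then (v, vt, vn, f ++ [line])
        else (v, vt, vn, f))
      (v, vt, vn, f)
    = (v ++ pvG 0 xs, vt ++ pvG 1 xs, vn ++ pvG 2 xs, f ++ pvG 3 xs) := by
  induction xs generalizing v vt vn f with
  | nil => simp [pvG]
  | cons l t ih =>
    simp only [List.foldl_cons]
    have hg : ∀ i : Int, pvG i (l :: t) =
        if pvRank l == some i then l :: pvG i t else pvG i t := by
      intro i; simp [pvG, List.filter_cons]
    by_cases h0 : PySem.Str.startswith l "v "
    · have hr : pvRank l = some 0 := by unfold pvRank; rw [if_pos h0]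
      simp only [h0, if_true, ih, hg, hr]
      simp
    · by_cases h1 : PySem.Str.startswith l "vt "
      · have hr : pvRank l = some 1 := by unfold pvRank; rw [if_neg h0, if_pos h1]
        simp only [h0, h1, if_true, Bool.false_eq_true, if_false, ih, hg, hr]
        simp
      · by_cases h2 : PySem.Str.startswith l "vn "
        · have hr : pvRank l = some 2 := by unfold pvRank; rw [if_neg h0, if_neg h1, if_pos h2]
          simp only [h0, h1, h2, if_true, Bool.false_eq_true, if_false, ih, hg, hr]
          simp
        · by_cases h3 : PySem.Str.startswith l "f "
          · have hr : pvRank l = some 3 := by unfold pvRank; rw [if_neg h0, if_neg h1, if_neg h2, if_pos h3]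
            simp only [h0, h1, h2, h3, if_true, Bool.false_eq_true, if_false, ih, hg, hr]
            simp
          · have hr : pvRank l = none := by unfold pvRank; rw [if_neg h0, if_neg h1, if_neg h2, if_neg h3]
            simp only [h0, h1, h2, h3, Bool.false_eq_true, if_false, ih, hg, hr]
            simp

lemma foldlB (xs : List String) (acc : List (Int × String)) :
    xs.foldl
      (fun (acc : List (Int × String)) line =>
        match pvRank line with
        | some r => acc ++ [(r, line)]
        | none => acc) acc
    = acc ++ pvPairs xs := by
  induction xs generalizing acc with
  | nil => simp [pvPairs]
  | cons l t ih =>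
    simp only [List.foldl_cons]
    cases h : pvRank l <;> simp [h, ih, pvPairs]

lemma insertBy_cons {α : Type} (before : α → α → Bool) (x y : α) (ys : List α) :
    PySem.List.insertBy before x (y :: ys) =
      if before x y then x :: y :: ys else y :: PySem.List.insertBy before x ys := by
  rfl

lemma insertBy_append_not_before {α : Type} (before : α → α → Bool) (x : α)
    (L R : List α) (h : ∀ y ∈ L, before x y = false) :
    PySem.List.insertBy before x (L ++ R) = L ++ PySem.List.insertBy before x R := by
  induction L with
  | nil => simp
  | cons y ys ih =>
    have hy : before x y = false := h y (by simp)
    have hrec := ih (fun z hz => h z (by simp [hz]))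
    simp [insertBy_cons, hy, hrec]

lemma insertBy_cons_of_before {α : Type} (before : α → α → Bool) (x y : α)
    (ys : List α) (h : before x y = true) :
    PySem.List.insertBy before x (y :: ys) = x :: y :: ys := by
  simp [PySem.List.insertBy, h]

lemma mem_pvF (i : Int) (P : List (Int × String)) (t : Int × String)
    (h : t ∈ pvF i P) : t.1 = i := by
  unfold pvF at h
  have := List.of_mem_filter h
  simpa using this

lemma sorted_ranked (P : List (Int × String))
    (hP : ∀ t ∈ P, t.1 = 0 ∨ t.1 = 1 ∨ t.1 = 2 ∨ t.1 = 3) :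
    PySem.List.sorted P (fun t => t.1)
      = pvF 0 P ++ pvF 1 P ++ pvF 2 P ++ pvF 3 P := by
  rw [PySem.List.sorted_eq_foldl_insertBy]
  induction P using List.reverseRecOn with
  | nil => simp [pvF]
  | append_singleton t x ih =>
    have hx := hP x (by simp)
    have ht : ∀ s ∈ t, s.1 = 0 ∨ s.1 = 1 ∨ s.1 = 2 ∨ s.1 = 3 :=
      fun s hs => hP s (by simp [hs])
    rw [List.foldl_append, List.foldl_cons, List.foldl_nil, ih ht]
    have hb : ∀ (i : Int), x.1 = i →
        ∀ j (hj : j ≤ i), ∀ y ∈ pvF j t, (decide (x.1 < y.1)) = false := by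
      intro i hi j hj y hy
      have := mem_pvF j t y hy
      simp [hi, this]; omega
    -- filters of t ++ [x]
    have hf : ∀ (j : Int), pvF j (t ++ [x]) =
        if x.1 = j then pvF j t ++ [x] else pvF j t := by
      intro j
      unfold pvF
      rcases eq_or_ne x.1 j with h | h <;>
        simp [List.filter_append, h]
    rcases hx with h | h | h | h
    · -- rank 0 : goes after pvF 0, before the rest (or at the end)
      rw [show pvF 0 t ++ pvF 1 t ++ pvF 2 t ++ pvF 3 t
            = pvF 0 t ++ (pvF 1 t ++ pvF 2 t ++ pvF 3 t) by simp,
          insertBy_append_not_before _ _ (pvF 0 t) _ (hb 0 h 0 (by norm_num))]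
      have : PySem.List.insertBy (fun a b => decide (a.1 < b.1)) x
          (pvF 1 t ++ pvF 2 t ++ pvF 3 t) = x :: (pvF 1 t ++ pvF 2 t ++ pvF 3 t) := by
        cases hc : pvF 1 t ++ pvF 2 t ++ pvF 3 t with
        | nil => simp [PySem.List.insertBy]
        | cons y ys =>
          have hy : y ∈ pvF 1 t ++ pvF 2 t ++ pvF 3 t := by rw [hc]; simp
          have : (1:Int) ≤ y.1 := by
            simp only [List.mem_append] at hy
            rcases hy with (hy | hy) | hy
            · exact le_of_eq (mem_pvF 1 t y hy).symm
            · rw [mem_pvF 2 t y hy]; norm_num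
            · rw [mem_pvF 3 t y hy]; norm_num
          exact insertBy_cons_of_before _ _ _ _ (by simp [h]; omega)
      rw [this, hf 0, hf 1, hf 2, hf 3]
      simp [h, (by norm_num : (0:Int) ≠ 1), (by norm_num : (0:Int) ≠ 2),
            (by norm_num : (0:Int) ≠ 3)]
    · rw [show pvF 0 t ++ pvF 1 t ++ pvF 2 t ++ pvF 3 t
            = (pvF 0 t ++ pvF 1 t) ++ (pvF 2 t ++ pvF 3 t) by simp,
          insertBy_append_not_before _ _ (pvF 0 t ++ pvF 1 t) _ ?_]
      · have : PySem.List.insertBy (fun a b => decide (a.1 < b.1)) x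
            (pvF 2 t ++ pvF 3 t) = x :: (pvF 2 t ++ pvF 3 t) := by
          cases hc : pvF 2 t ++ pvF 3 t with
          | nil => simp [PySem.List.insertBy]
          | cons y ys =>
            have hy : y ∈ pvF 2 t ++ pvF 3 t := by rw [hc]; simp
            have : (2:Int) ≤ y.1 := by
              simp only [List.mem_append] at hy
              rcases hy with hy | hy
              · exact le_of_eq (mem_pvF 2 t y hy).symm
              · rw [mem_pvF 3 t y hy]; norm_num
            exact insertBy_cons_of_before _ _ _ _ (by simp [h]; omega)
        rw [this, hf 0, hf 1, hf 2, hf 3]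
        simp [h, (by norm_num : (1:Int) ≠ 0), (by norm_num : (1:Int) ≠ 2),
              (by norm_num : (1:Int) ≠ 3)]
      · intro y hy
        simp only [List.mem_append] at hy
        rcases hy with hy | hy
        · exact hb 1 h 0 (by norm_num) y hy
        · exact hb 1 h 1 (by norm_num) y hy
    · rw [show pvF 0 t ++ pvF 1 t ++ pvF 2 t ++ pvF 3 t
            = (pvF 0 t ++ pvF 1 t ++ pvF 2 t) ++ pvF 3 t by simp,
          insertBy_append_not_before _ _ (pvF 0 t ++ pvF 1 t ++ pvF 2 t) _ ?_]
      · have : PySem.List.insertBy (fun a b => decide (a.1 < b.1)) x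
            (pvF 3 t) = x :: pvF 3 t := by
          cases hc : pvF 3 t with
          | nil => simp [PySem.List.insertBy]
          | cons y ys =>
            have hy : y ∈ pvF 3 t := by rw [hc]; simp
            have := mem_pvF 3 t y hy
            exact insertBy_cons_of_before _ _ _ _ (by simp [h, this])
        rw [this, hf 0, hf 1, hf 2, hf 3]
        simp [h, (by norm_num : (2:Int) ≠ 0), (by norm_num : (2:Int) ≠ 1)]
      · intro y hy
        simp only [List.mem_append] at hy
        rcases hy with (hy | hy) | hy
        · exact hb 2 h 0 (by norm_num) y hy
        · exact hb 2 h 1 (by norm_num) y hy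
        · exact hb 2 h 2 (by norm_num) y hy
    · rw [show pvF 0 t ++ pvF 1 t ++ pvF 2 t ++ pvF 3 t
            = (pvF 0 t ++ pvF 1 t ++ pvF 2 t ++ pvF 3 t) ++ [] by simp,
          insertBy_append_not_before _ _ _ _ ?_]
      · simp only [PySem.List.insertBy]
        rw [hf 0, hf 1, hf 2, hf 3]
        simp [h, (by norm_num : (3:Int) ≠ 0), (by norm_num : (3:Int) ≠ 1)]
      · intro y hy
        simp only [List.mem_append] at hy
        rcases hy with ((hy | hy) | hy) | hy
        · exact hb 3 h 0 (by norm_num) y hy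
        · exact hb 3 h 1 (by norm_num) y hy
        · exact hb 3 h 2 (by norm_num) y hy
        · exact hb 3 h 3 (by norm_num) y hy

lemma mapsnd_pvF (i : Int) (xs : List String) :
    (pvF i (pvPairs xs)).map (fun t => t.2) = pvG i xs := by
  induction xs with
  | nil => simp [pvF, pvPairs, pvG]
  | cons l t ih =>
    cases h : pvRank l with
    | none =>
      simp [pvF, pvPairs, pvG, h] at *
      exact ih
    | some r =>
      rcases eq_or_ne r i with hr | hr <;>
        simp [pvF, pvPairs, pvG, h, hr] at * <;>
        exact ih

lemma pairs_ranked (xs : List String) :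
    ∀ t ∈ pvPairs xs, t.1 = 0 ∨ t.1 = 1 ∨ t.1 = 2 ∨ t.1 = 3 := by
  intro t ht
  unfold pvPairs at ht
  simp only [List.mem_filterMap, Option.map_eq_some_iff] at ht
  obtain ⟨l, _, r, hr, rfl⟩ := ht
  exact pvRank_cases l r hr

-- ===== VERDICT (by name: the statement is the Claim_ definition above) =====
theorem sortFile_spec : Claim_equal_sortFile := by
  intro file _
  unfold Spec_sortFile sortFile sortFile_alt
  rw [foldlA, foldlB]
  simp only [List.nil_append]
  rw [sorted_ranked (pvPairs file) (pairs_ranked file)]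
  simp [List.map_append, mapsnd_pvF]
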